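-- pv_equiv track=rewrite | github.com/rodjjo/editorium | editorium/app/server/pipelines/ltx/inference.py | convert_prompt_to_filename
-- ===== SOURCE A (Python) =====
-- def convert_prompt_to_filename(text: str, max_len: int = 20) -> str:
--     # Remove non-letters and convert to lowercase
--     clean_text = "".join(
--         char.lower() for char in text if char.isalpha() or char.isspace()
--     )
--
--     # Split into words
--     words = clean_text.split()
--
--     # Build result string keeping track of length
--     result = []
--     current_length = 0
--
--     for word in words:
--         # Add word length plus 1 for underscore (except for first word)
--         new_length = current_length + len(word)
--
--         if new_length <= max_len:
--             result.append(word)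
--             current_length += len(word)
--         else:
--             break
--
--     return "-".join(result)
-- ===== SOURCE B (Python) =====
-- def convert_prompt_to_filename(text: str, max_len: int = 20) -> str:
--     # Different decomposition: clean via a per-char mapping to "" or the lowered
--     # char, then a budget-decrementing recursion that builds the joined string
--     # directly (no result list, no join, no running total).
--     def clean(c):
--         return c.lower() if c.isalpha() or c.isspace() else ""
--     words = "".join(map(clean, text)).split()
--
--     def pick(ws, budget):
--         if not ws or len(ws[0]) > budget:
--             return ""
--         tail = pick(ws[1:], budget - len(ws[0]))
--         return ws[0] if not tail else ws[0] + "-" + tail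
--
--     return pick(words, max_len)
-- ===== Notes on version B (the rewrite author's own statement) =====
-- stated objective: alternative
-- what changed: A's accumulator loop that appends kept words to a list and then joins them is replaced by a recursion over the words carrying the remaining budget (max_len minus what is used) and building the dash-joined string directly during the recursion; the cleaning step maps each char to an empty or lowered fragment instead of filter-then-lower.
import Mathlib
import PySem

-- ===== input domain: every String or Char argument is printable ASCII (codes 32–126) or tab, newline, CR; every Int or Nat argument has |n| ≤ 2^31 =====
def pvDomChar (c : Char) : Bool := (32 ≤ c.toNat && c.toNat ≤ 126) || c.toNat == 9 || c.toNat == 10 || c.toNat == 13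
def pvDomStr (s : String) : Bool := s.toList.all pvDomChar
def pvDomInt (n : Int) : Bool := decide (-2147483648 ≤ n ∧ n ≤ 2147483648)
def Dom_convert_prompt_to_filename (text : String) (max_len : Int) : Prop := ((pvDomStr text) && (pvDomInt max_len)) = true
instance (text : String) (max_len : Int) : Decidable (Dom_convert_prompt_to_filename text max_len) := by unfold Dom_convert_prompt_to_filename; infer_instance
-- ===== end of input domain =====

-- B replaces A's append-to-list-then-join accumulator loop by a budget-decrementing
-- recursion that builds the dash-joined string directly (objective: alternative decomposition, same cost).

-- ===== PORT A =====
-- A's 'for word in words: … break' loop: recursion over the words with the running length.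
def pvLoopA (max_len : Int) (ws : List (List Char)) (current_length : Int) : List (List Char) :=
  match ws with
  | [] => []
  | word :: rest =>
    let new_length := current_length + PySem.Chars.len word
    if new_length ≤ max_len then
      word :: pvLoopA max_len rest (current_length + PySem.Chars.len word)
    else []

def convert_prompt_to_filename (text : String) (max_len : Int) : String :=
  let clean_text := (text.toList.filter (fun c => PySem.Chars.isalpha c || PySem.Chars.isspace c)).map PySem.Chars.lowerChar
  let words := PySem.Chars.split₀ clean_text
  String.ofList (PySem.Chars.join ['-'] (pvLoopA max_len words 0))

-- ===== PORT B =====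
-- Source B's 'clean(c)': each char becomes '' or its lowered form; ''.join(map(clean, text)) is the flatMap.
def pvCleanB (c : Char) : List Char :=
  if PySem.Chars.isalpha c || PySem.Chars.isspace c then [PySem.Chars.lowerChar c] else []

-- Source B's 'pick(ws, budget)': build the joined string directly while the budget lasts.
def pvPickB (ws : List (List Char)) (budget : Int) : List Char :=
  match ws with
  | [] => []
  | w :: rest =>
    if budget < PySem.Chars.len w then []
    else
      let tail := pvPickB rest (budget - PySem.Chars.len w)
      if tail = [] then w else w ++ '-' :: tail

def convert_prompt_to_filename_alt (text : String) (max_len : Int) : String :=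
  String.ofList (pvPickB (PySem.Chars.split₀ (text.toList.flatMap pvCleanB)) max_len)

-- ===== PRECONDITION & SPEC =====
def Spec_convert_prompt_to_filename (text : String) (max_len : Int) (out : String) : Prop := out = convert_prompt_to_filename_alt text max_len
instance (text : String) (max_len : Int) (out : String) : Decidable (Spec_convert_prompt_to_filename text max_len out) := by unfold Spec_convert_prompt_to_filename; infer_instance

-- ===== CLAIM (what is proved, stated in full; the proofs are below) =====
def Claim_equal_convert_prompt_to_filename : Prop := ∀ (text : String) (max_len : Int), Dom_convert_prompt_to_filename text max_len → Spec_convert_prompt_to_filename text max_len (convert_prompt_to_filename text max_len)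

-- ===== LEMMAS AND PROOFS =====

-- the two cleaning passes produce the same char list
theorem clean_eq (l : List Char) :
    l.flatMap pvCleanB
      = (l.filter (fun c => PySem.Chars.isalpha c || PySem.Chars.isspace c)).map PySem.Chars.lowerChar := by
  induction l with
  | nil => rfl
  | cons c rest ih =>
    by_cases h : (PySem.Chars.isalpha c || PySem.Chars.isspace c) = true <;>
      simp [pvCleanB, h, ih]

-- every word produced by split₀ is nonempty
theorem split₀_go_ne_nil (s : List Char) (cur : List Char) (acc : List (List Char))
    (hacc : ∀ a ∈ acc, a ≠ []) :
    ∀ w ∈ PySem.Chars.split₀.go s cur acc, w ≠ [] := by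
  induction s generalizing cur acc with
  | nil =>
    intro w hw
    by_cases hc : cur.isEmpty = true <;> simp [PySem.Chars.split₀.go, hc] at hw
    · exact hacc w hw
    · rcases hw with h | h
      · exact hacc w h
      · subst h
        simpa using hc
  | cons c rest ih =>
    intro w hw
    by_cases hs : PySem.Chars.isspace c = true
    · by_cases hc : cur.isEmpty = true
      · simp only [PySem.Chars.split₀.go, hs, hc, if_true] at hw
        exact ih [] acc hacc w hw
      · simp only [PySem.Chars.split₀.go, hs, hc, if_true] at hw
        refine ih [] (cur.reverse :: acc) ?_ w hw
        intro a ha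
        rcases List.mem_cons.mp ha with h | h
        · subst h
          simpa using hc
        · exact hacc a h
    · simp only [PySem.Chars.split₀.go, hs] at hw
      exact ih (c :: cur) acc hacc w hw

theorem split₀_ne_nil (s : List Char) : ∀ w ∈ PySem.Chars.split₀ s, w ≠ [] :=
  split₀_go_ne_nil s [] [] (by simp)

-- A's kept prefix consists of words of the input list
theorem pvLoopA_mem (max_len : Int) (ws : List (List Char)) (cur : Int) :
    ∀ x ∈ pvLoopA max_len ws cur, x ∈ ws := by
  induction ws generalizing cur with
  | nil => simp [pvLoopA]
  | cons w rest ih =>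
    intro x hx
    simp only [pvLoopA] at hx
    split_ifs at hx with h
    · rcases List.mem_cons.mp hx with h' | h'
      · simp [h']
      · exact List.mem_cons_of_mem _ (ih _ x h')
    · simp at hx

-- a dash-join of a nonempty list of nonempty words is nonempty
theorem join_ne_nil (a : List Char) (l : List (List Char)) (ha : a ≠ []) :
    PySem.Chars.join ['-'] (a :: l) ≠ [] := by
  cases l with
  | nil => simpa [PySem.Chars.join_singleton] using ha
  | cons b t => simp [PySem.Chars.join_cons_cons]

-- the core correspondence: A's loop + join = B's budget recursion
theorem loop_eq_pick (max_len : Int) (ws : List (List Char)) (cur : Int)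
    (hne : ∀ w ∈ ws, w ≠ []) :
    PySem.Chars.join ['-'] (pvLoopA max_len ws cur) = pvPickB ws (max_len - cur) := by
  induction ws generalizing cur with
  | nil => simp [pvLoopA, pvPickB, PySem.Chars.join, List.intercalate]
  | cons w rest ih =>
    have hrest : ∀ x ∈ rest, x ≠ [] := fun x hx => hne x (List.mem_cons_of_mem _ hx)
    by_cases h : cur + PySem.Chars.len w ≤ max_len
    · have hfit : ¬ max_len - cur < PySem.Chars.len w := by
        simp [PySem.Chars.len_eq] at h ⊢; omega
      have hIH : PySem.Chars.join ['-'] (pvLoopA max_len rest (cur + PySem.Chars.len w))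
          = pvPickB rest (max_len - cur - PySem.Chars.len w) := by
        have := ih (cur + PySem.Chars.len w) hrest
        rwa [show max_len - (cur + PySem.Chars.len w) = max_len - cur - PySem.Chars.len w by ring] at this
      simp only [pvLoopA, pvPickB, if_pos h, if_neg hfit]
      cases hL : pvLoopA max_len rest (cur + PySem.Chars.len w) with
      | nil =>
        rw [hL] at hIH
        have htail : pvPickB rest (max_len - cur - PySem.Chars.len w) = [] := by
          rw [← hIH]; simp [PySem.Chars.join, List.intercalate]
        rw [htail, if_pos rfl]
        simp [PySem.Chars.join_singleton]
      | cons a t =>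
        rw [hL] at hIH
        have hane : a ≠ [] := hrest a (pvLoopA_mem max_len rest (cur + PySem.Chars.len w) a (hL ▸ List.mem_cons_self))
        have htail_ne : pvPickB rest (max_len - cur - PySem.Chars.len w) ≠ [] := by
          rw [← hIH]; exact join_ne_nil a t hane
        rw [if_neg htail_ne, ← hIH]
        simp [PySem.Chars.join_cons_cons]
    · have hfit : max_len - cur < PySem.Chars.len w := by
        simp [PySem.Chars.len_eq] at h ⊢; omega
      simp only [pvLoopA, pvPickB, if_neg h, if_pos hfit]
      simp [PySem.Chars.join, List.intercalate]

-- ===== VERDICT (by name: the statement is the Claim_ definition above) =====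
theorem convert_prompt_to_filename_spec : Claim_equal_convert_prompt_to_filename := by
  intro text max_len _
  unfold Spec_convert_prompt_to_filename convert_prompt_to_filename convert_prompt_to_filename_alt
  have key : PySem.Chars.join ['-']
        (pvLoopA max_len (PySem.Chars.split₀
          ((text.toList.filter (fun c => PySem.Chars.isalpha c || PySem.Chars.isspace c)).map PySem.Chars.lowerChar)) 0)
      = pvPickB (PySem.Chars.split₀ (text.toList.flatMap pvCleanB)) max_len := by
    rw [clean_eq]
    rw [loop_eq_pick max_len _ 0 (split₀_ne_nil _)]
    norm_num
  exact congrArg String.ofList key
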